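-- pv_equiv track=rewrite | github.com/amrithajayadev/misc | strings/longest_palindrome.py | find_len_longes_palindrome
-- ===== SOURCE A (Python) =====
-- from collections import Counter
--
-- def find_len_longes_palindrome(s):
--     char_freq = Counter(s)
--     l = 0
--     odd = 0
--     for k, v in char_freq.items():
--         if v % 2 == 0:
--             l += v
--         else:
--             odd += v % 2
--     if odd > 0:
--         return len(s) - odd + 1
--     else:
--         return len(s)
-- ===== SOURCE B (Python) =====
-- def find_len_longes_palindrome(s):
--     t = sorted(s)
--     n = len(t)
--     pairs = 0
--     i = 0
--     while i + 1 < n: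
--         if t[i] == t[i + 1]:
--             pairs += 2
--             i += 2
--         else:
--             i += 1
--     return pairs + 1 if pairs < n else pairs
-- ===== Notes on version B (the rewrite author's own statement) =====
-- stated objective: alternative
-- what changed: Replaces the frequency table and parity scan by sorting the string and greedily consuming adjacent equal pairs in one index scan over the sorted list (pairs = usable pair characters), returning pairs+1 if a character is left over.
import Mathlib
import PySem

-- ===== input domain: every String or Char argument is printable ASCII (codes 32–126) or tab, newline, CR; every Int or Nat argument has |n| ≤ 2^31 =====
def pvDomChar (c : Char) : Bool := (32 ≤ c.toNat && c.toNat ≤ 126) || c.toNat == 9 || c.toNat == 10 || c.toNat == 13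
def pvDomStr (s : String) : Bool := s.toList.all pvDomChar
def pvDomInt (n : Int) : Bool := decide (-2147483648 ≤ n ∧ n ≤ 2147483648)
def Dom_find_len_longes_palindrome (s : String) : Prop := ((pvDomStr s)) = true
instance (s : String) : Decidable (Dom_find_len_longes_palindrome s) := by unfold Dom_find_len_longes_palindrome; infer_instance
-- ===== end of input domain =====

-- B sorts the string and greedily consumes adjacent equal pairs in one scan instead of building a frequency table and checking parities (objective: alternative).

-- ===== PORT A =====
def find_len_longes_palindrome (s : String) : Int :=
  let char_freq := PySem.Dict.counter s.toList
  let p := char_freq.items.foldl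
    (fun (acc : Int × Int) kv =>
      if PySem.Int.mod kv.2 2 = 0 then (acc.1 + kv.2, acc.2)
      else (acc.1, acc.2 + PySem.Int.mod kv.2 2))
    (0, 0)
  if p.2 > 0 then PySem.Str.len s - p.2 + 1 else PySem.Str.len s

-- ===== PORT B =====
-- B's while loop over index i on the sorted list, advancing by 2 past an adjacent
-- equal pair and by 1 otherwise, transcribed as recursion on the remaining suffix.
def pvPairScan : List Char → Int
  | [] => 0
  | [_] => 0
  | a :: b :: t => if a == b then 2 + pvPairScan t else pvPairScan (b :: t)
termination_by l => l.length

def find_len_longes_palindrome_alt (s : String) : Int :=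
  let t := PySem.List.sorted s.toList (fun c => c) false
  let n : Int := t.length
  let pairs := pvPairScan t
  if pairs < n then pairs + 1 else pairs

-- ===== PRECONDITION & SPEC =====
def Spec_find_len_longes_palindrome (s : String) (out : Int) : Prop := out = find_len_longes_palindrome_alt s
instance (s : String) (out : Int) : Decidable (Spec_find_len_longes_palindrome s out) := by unfold Spec_find_len_longes_palindrome; infer_instance

-- ===== CLAIM (what is proved, stated in full; the proofs are below) =====
def Claim_equal_find_len_longes_palindrome : Prop := ∀ (s : String), Dom_find_len_longes_palindrome s → Spec_find_len_longes_palindrome s (find_len_longes_palindrome s)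

-- ===== LEMMAS AND PROOFS =====

-- number of characters occurring an odd number of times in l
def pvNumOdd (l : List Char) : Nat :=
  (PySem.Set.ofList l).countP (fun k => l.count k % 2 == 1)

-- A's odd accumulator over the counter's keys counts the odd-count keys.
theorem pv_odd_fold (cs l : List Char) (a b : Int) :
    (l.foldl (fun (acc : Int × Int) k =>
        if PySem.Int.mod (cs.count k : Int) 2 = 0 then (acc.1 + (cs.count k : Int), acc.2)
        else (acc.1, acc.2 + PySem.Int.mod (cs.count k : Int) 2)) (a, b)).2
      = b + (l.countP (fun k => cs.count k % 2 == 1) : Int) := by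
  induction l generalizing a b with
  | nil => simp
  | cons k t ih =>
    simp only [List.foldl_cons, List.countP_cons]
    rcases Nat.mod_two_eq_zero_or_one (cs.count k) with h | h
    · rw [if_pos (by rw [← Nat.cast_ofNat, PySem.Int.mod_natCast, h]; rfl)]
      rw [ih]; simp [h]
    · rw [if_neg (by rw [← Nat.cast_ofNat, PySem.Int.mod_natCast, h]; simp)]
      rw [ih, ← Nat.cast_ofNat, PySem.Int.mod_natCast, h]
      simp only [beq_iff_eq]
      push_cast
      ring

-- countP over two duplicate-free lists with the same members agrees
theorem pv_countP_nodup_ext (S T : List Char) (p : Char → Bool)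
    (hS : S.Nodup) (hT : T.Nodup) (h : ∀ x, x ∈ S ↔ x ∈ T) :
    S.countP p = T.countP p :=
  ((List.perm_ext_iff_of_nodup hS hT).mpr h).countP_eq p

theorem pv_numOdd_perm (l₁ l₂ : List Char) (h : l₁.Perm l₂) : pvNumOdd l₁ = pvNumOdd l₂ := by
  unfold pvNumOdd
  rw [List.countP_congr (fun x _ => by rw [h.count_eq])]
  exact pv_countP_nodup_ext _ _ _ (PySem.Set.nodup_ofList l₁) (PySem.Set.nodup_ofList l₂)
    (fun x => by rw [PySem.Set.mem_ofList, PySem.Set.mem_ofList, h.mem_iff])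

theorem pv_numOdd_cons_cons (a : Char) (t : List Char) :
    pvNumOdd (a :: a :: t) = pvNumOdd t := by
  unfold pvNumOdd
  have hcongr : ∀ (L : List Char), L.countP (fun k => (a :: a :: t).count k % 2 == 1)
      = L.countP (fun k => t.count k % 2 == 1) := by
    intro L
    apply List.countP_congr
    intro x _
    by_cases hx : a = x
    · subst hx; simp; omega
    · simp [hx]
  rw [hcongr]
  by_cases ha : a ∈ t
  · refine pv_countP_nodup_ext _ _ _ (PySem.Set.nodup_ofList _) (PySem.Set.nodup_ofList _)
      (fun x => ?_)
    simp only [PySem.Set.mem_ofList, List.mem_cons]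
    constructor
    · rintro (rfl | rfl | h) <;> first | exact ha | exact h
    · exact fun h => Or.inr (Or.inr h)
  · have h2 : (PySem.Set.ofList (a :: a :: t)).countP (fun k => t.count k % 2 == 1)
        = (a :: PySem.Set.ofList t).countP (fun k => t.count k % 2 == 1) := by
      refine pv_countP_nodup_ext _ _ _ (PySem.Set.nodup_ofList _) ?_ (fun x => ?_)
      · exact List.Nodup.cons (by simp [PySem.Set.mem_ofList, ha]) (PySem.Set.nodup_ofList t)
      · simp only [PySem.Set.mem_ofList, List.mem_cons]
        constructor
        · rintro (rfl | rfl | h) <;> simp [*]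
        · rintro (rfl | h) <;> simp [*]
    rw [h2, List.countP_cons]
    simp [List.count_eq_zero_of_not_mem ha]

theorem pv_numOdd_cons_notmem (a : Char) (t : List Char) (ha : a ∉ t) :
    pvNumOdd (a :: t) = pvNumOdd t + 1 := by
  unfold pvNumOdd
  have h2 : (PySem.Set.ofList (a :: t)).countP (fun k => (a :: t).count k % 2 == 1)
      = (a :: PySem.Set.ofList t).countP (fun k => (a :: t).count k % 2 == 1) := by
    refine pv_countP_nodup_ext _ _ _ (PySem.Set.nodup_ofList _) ?_ (fun x => ?_)
    · exact List.Nodup.cons (by simp [PySem.Set.mem_ofList, ha]) (PySem.Set.nodup_ofList t)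
    · simp [PySem.Set.mem_ofList]
  have h1 : ((a :: t).count a % 2 == 1) = true := by
    simp [List.count_eq_zero_of_not_mem ha]
  have hc : (PySem.Set.ofList t).countP (fun k => (a :: t).count k % 2 == 1)
      = (PySem.Set.ofList t).countP (fun k => t.count k % 2 == 1) := by
    apply List.countP_congr
    intro x hx
    have hxa : ¬ a = x := fun h => ha (by simpa [PySem.Set.mem_ofList, h] using hx)
    simp [hxa]
  rw [h2, List.countP_cons, h1, hc]
  simp

-- main invariant: on a sorted list the greedy pair scan leaves exactly the odd characters unpaired
theorem pv_pairScan_sorted (l : List Char) (h : l.Pairwise (· ≤ ·)) :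
    pvPairScan l + (pvNumOdd l : Int) = (l.length : Int) := by
  induction l using pvPairScan.induct with
  | case1 => simp [pvPairScan, pvNumOdd, PySem.Set.ofList]
  | case2 a =>
    have : pvNumOdd [a] = 1 := by
      unfold pvNumOdd
      simp [PySem.Set.ofList, PySem.Set.add, PySem.Set.empty, PySem.Set.contains]
    simp [pvPairScan, this]
  | case3 a b t hab ih =>
    have hab' : a = b := by simpa using hab
    subst hab'
    rw [show pvPairScan (a :: a :: t) = 2 + pvPairScan t from by rw [pvPairScan]; simp,
      pv_numOdd_cons_cons]
    have ht : t.Pairwise (· ≤ ·) := (List.pairwise_cons.mp (List.pairwise_cons.mp h).2).2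
    have := ih ht
    simp only [List.length_cons]
    push_cast
    omega
  | case4 a b t hab ih =>
    have hab' : a ≠ b := by simpa using hab
    rw [show pvPairScan (a :: b :: t) = pvPairScan (b :: t) from by rw [pvPairScan]; simp [hab]]
    have hmem : a ∉ b :: t := by
      intro hmem
      rcases List.mem_cons.mp hmem with rfl | hat
      · exact hab' rfl
      · have h1 : a ≤ b := (List.pairwise_cons.mp h).1 b (by simp)
        have h2 : b ≤ a := (List.pairwise_cons.mp (List.pairwise_cons.mp h).2).1 a hat
        exact hab' (le_antisymm h1 h2)
    rw [show (a :: b :: t) = a :: (b :: t) from rfl, pv_numOdd_cons_notmem a (b :: t) hmem]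
    have := ih (List.pairwise_cons.mp h).2
    simp only [List.length_cons] at *
    push_cast at *
    omega

-- ===== VERDICT (by name: the statement is the Claim_ definition above) =====
theorem find_len_longes_palindrome_spec : Claim_equal_find_len_longes_palindrome := by
  intro s _
  unfold Spec_find_len_longes_palindrome find_len_longes_palindrome find_len_longes_palindrome_alt
  simp only [PySem.Dict.items_counter, List.foldl_map]
  rw [pv_odd_fold s.toList (PySem.Set.ofList s.toList) 0 0]
  have hperm := PySem.List.sorted_perm s.toList (fun c => c) false
  have hsorted : (PySem.List.sorted s.toList (fun c => c) false).Pairwise (· ≤ ·) := by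
    simpa using PySem.List.sorted_pairwise s.toList (fun c => c)
  have hmain := pv_pairScan_sorted _ hsorted
  rw [pv_numOdd_perm _ _ hperm] at hmain
  have hodd : ((PySem.Set.ofList s.toList).countP (fun k => s.toList.count k % 2 == 1) : Int)
      = (pvNumOdd s.toList : Int) := rfl
  rw [hodd, PySem.Str.len_eq s, hperm.length_eq] at *
  split_ifs <;> omega
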